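-- pv_equiv track=rewrite | github.com/kovbando/quick_calib | quick_calib.py | _validate_image_sizes
-- ===== SOURCE A (Python) =====
-- from typing import Any, Dict, Iterable, List, Optional, Tuple
--
-- def _validate_image_sizes(image_sizes: List[Tuple[int, int]]) -> Tuple[int, int]:
--     if not image_sizes:
--         raise SystemExit("No valid images were detected.")
--
--     reference = image_sizes[0]
--     for size in image_sizes[1:]:
--         if size != reference:
--             raise SystemExit(
--                 "Images have different sizes. Please provide same-size images."
--             )
--     return reference
-- ===== SOURCE B (Python) =====
-- def _validate_image_sizes(image_sizes):
--     if not image_sizes: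
--         raise SystemExit("No valid images were detected.")
--     distinct = set(image_sizes)
--     if len(distinct) > 1:
--         raise SystemExit(
--             "Images have different sizes. Please provide same-size images."
--         )
--     return image_sizes[0]
-- ===== Notes on version B (the rewrite author's own statement) =====
-- stated objective: idiomatic
-- what changed: Replaced the per-element reference-comparison loop (with an early-exit branch per element) by building a set of the sizes in one pass and testing its cardinality once; the return value stays image_sizes[0].
import Mathlib
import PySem

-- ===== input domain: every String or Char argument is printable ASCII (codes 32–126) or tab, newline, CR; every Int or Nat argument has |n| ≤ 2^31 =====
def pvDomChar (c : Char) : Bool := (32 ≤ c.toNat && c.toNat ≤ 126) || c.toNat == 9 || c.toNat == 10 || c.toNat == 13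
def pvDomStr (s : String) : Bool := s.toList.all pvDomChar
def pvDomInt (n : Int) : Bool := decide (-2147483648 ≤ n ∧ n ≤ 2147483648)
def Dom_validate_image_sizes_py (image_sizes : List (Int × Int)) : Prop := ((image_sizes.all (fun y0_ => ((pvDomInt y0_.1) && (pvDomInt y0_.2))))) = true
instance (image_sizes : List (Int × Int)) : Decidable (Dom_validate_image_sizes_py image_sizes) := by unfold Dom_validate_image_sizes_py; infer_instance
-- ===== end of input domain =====

-- B replaces A's per-element comparison loop by a build-a-set-then-check-cardinality pass (idiomatic; same cost).
-- Both programs raise SystemExit on the empty list and on lists with unequal sizes; those inputs are outside Pre_,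
-- and the (0,0) placeholders in the ports stand where the Python raises.

-- ===== PORT A =====
-- loop 'for size in image_sizes[1:]'; (0,0) marks the raise path (excluded by Pre_)
def pvLoopA (reference : Int × Int) : List (Int × Int) → Int × Int
  | [] => reference
  | size :: rest => if size ≠ reference then (0, 0) else pvLoopA reference rest

def validate_image_sizes_py (image_sizes : List (Int × Int)) : Int × Int :=
  match image_sizes with
  | [] => (0, 0)            -- raise SystemExit("No valid images were detected.")
  | reference :: rest => pvLoopA reference rest

-- ===== PORT B =====
def validate_image_sizes_py_alt (image_sizes : List (Int × Int)) : Int × Int :=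
  match image_sizes with
  | [] => (0, 0)            -- raise SystemExit("No valid images were detected.")
  | first :: _ =>
      let distinct : PySem.Set (Int × Int) := PySem.Set.ofList image_sizes
      if PySem.Set.len distinct > 1 then (0, 0)   -- raise SystemExit("Images have different sizes...")
      else first

-- ===== PRECONDITION & SPEC =====
-- Pre_ excludes exactly the inputs where the Python A raises SystemExit: the empty list and lists with unequal sizes.
def Pre_validate_image_sizes_py (image_sizes : List (Int × Int)) : Prop :=
  image_sizes ≠ [] ∧ ∀ x ∈ image_sizes, x = image_sizes.headI
instance (image_sizes : List (Int × Int)) : Decidable (Pre_validate_image_sizes_py image_sizes) := by unfold Pre_validate_image_sizes_py; infer_instance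

def pvWitness_validate_image_sizes_py : (List (Int × Int)) := [(640, 480), (640, 480)]

def Spec_validate_image_sizes_py (image_sizes : List (Int × Int)) (out : Int × Int) : Prop := out = validate_image_sizes_py_alt image_sizes
instance (image_sizes : List (Int × Int)) (out : Int × Int) : Decidable (Spec_validate_image_sizes_py image_sizes out) := by unfold Spec_validate_image_sizes_py; infer_instance

-- ===== CLAIM (what is proved, stated in full; the proofs are below) =====
def Claim_equal_validate_image_sizes_py : Prop := ∀ (image_sizes : List (Int × Int)), Dom_validate_image_sizes_py image_sizes → Pre_validate_image_sizes_py image_sizes → Spec_validate_image_sizes_py image_sizes (validate_image_sizes_py image_sizes)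

-- ===== LEMMAS AND PROOFS =====
theorem pvLoopA_const (r : Int × Int) (rest : List (Int × Int)) (h : ∀ x ∈ rest, x = r) :
    pvLoopA r rest = r := by
  induction rest with
  | nil => rfl
  | cons s t ih =>
      have hs : s = r := h s (by simp)
      simp [pvLoopA, hs]
      exact ih (fun x hx => h x (by simp [hx]))

theorem pvOfList_const (r : Int × Int) (rest : List (Int × Int)) (h : ∀ x ∈ rest, x = r) :
    PySem.Set.ofList (r :: rest) = [r] := by
  have : ∀ (s : PySem.Set (Int × Int)), s = [r] → rest.foldl PySem.Set.add s = [r] := by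
    induction rest with
    | nil => intro s hs; simpa using hs
    | cons x t ih =>
        intro s hs
        have hx : x = r := h x (by simp)
        have : PySem.Set.add s x = [r] := by
          subst hs hx; simp [PySem.Set.add, PySem.Set.contains]
        exact ih (fun y hy => h y (by simp [hy])) _ this
  have h0 : PySem.Set.ofList (r :: rest) = rest.foldl PySem.Set.add (PySem.Set.add PySem.Set.empty r) := by
    simp [PySem.Set.ofList_eq_foldl, List.foldl]
  rw [h0]
  exact this _ (by simp [PySem.Set.add, PySem.Set.empty, PySem.Set.contains])

-- ===== VERDICT (by name: the statement is the Claim_ definition above) =====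
theorem validate_image_sizes_py_spec : Claim_equal_validate_image_sizes_py := by
  intro xs _ hpre
  obtain ⟨hne, hall⟩ := hpre
  unfold Spec_validate_image_sizes_py
  match xs, hne with
  | r :: rest, _ =>
      have hall' : ∀ x ∈ rest, x = r := by
        intro x hx; simpa using hall x (by simp [hx])
      have hA : validate_image_sizes_py (r :: rest) = r := by
        simp [validate_image_sizes_py]; exact pvLoopA_const r rest hall'
      have hB : validate_image_sizes_py_alt (r :: rest) = r := by
        simp [validate_image_sizes_py_alt, pvOfList_const r rest hall', PySem.Set.len]
      rw [hA, hB]
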